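-- pv_equiv track=rewrite | github.com/fermibot/pythonPackages | mathematica/lists_and_arrays.py | Hexonacci
-- ===== SOURCE A (Python) =====
-- def Hexonacci(n):
--     _a = 0
--     _b = 0
--     _c = 0
--     _d = 0
--     _e = 0
--     _f = 1
--     _i = 1
--     while _i < n:
--         _temp1 = _b
--         _temp2 = _c
--         _temp3 = _d
--         _temp4 = _e
--         _temp5 = _f
--         _f = _f + _e + _d + _c + _b + _a
--         _a = _temp1
--         _b = _temp2
--         _c = _temp3
--         _d = _temp4
--         _e = _temp5
--         _i += 1
--     return _f
-- ===== SOURCE B (Python) =====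
-- def _mat_mul(x, y):
--     # row i of x*y = sum_k x[i][k] * (row k of y)
--     return tuple(
--         tuple(sum(r[k] * y[k][j] for k in range(6)) for j in range(6))
--         for r in x
--     )
--
--
-- def _mat_pow(m, k):
--     if k == 0:
--         return tuple(tuple(1 if i == j else 0 for j in range(6)) for i in range(6))
--     p = _mat_pow(m, k // 2)
--     if k % 2 == 0:
--         return _mat_mul(p, p)
--     return _mat_mul(_mat_mul(p, p), m)
--
--
-- def _mul_vec(m, v):
--     return tuple(sum(m[i][k] * v[k] for k in range(6)) for i in range(6))
--
--
-- def Hexonacci(n):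
--     k = n - 1 if n > 1 else 0
--     t = ((0, 1, 0, 0, 0, 0),
--          (0, 0, 1, 0, 0, 0),
--          (0, 0, 0, 1, 0, 0),
--          (0, 0, 0, 0, 1, 0),
--          (0, 0, 0, 0, 0, 1),
--          (1, 1, 1, 1, 1, 1))
--     p = _mat_pow(t, k)
--     return _mul_vec(p, (0, 0, 0, 0, 0, 1))[5]
-- ===== Notes on version B (the rewrite author's own statement) =====
-- stated objective: faster
-- what changed: Replaced the O(n) six-variable shift loop by binary exponentiation of the 6x6 hexanacci transition matrix applied to the initial vector.
import Mathlib
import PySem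

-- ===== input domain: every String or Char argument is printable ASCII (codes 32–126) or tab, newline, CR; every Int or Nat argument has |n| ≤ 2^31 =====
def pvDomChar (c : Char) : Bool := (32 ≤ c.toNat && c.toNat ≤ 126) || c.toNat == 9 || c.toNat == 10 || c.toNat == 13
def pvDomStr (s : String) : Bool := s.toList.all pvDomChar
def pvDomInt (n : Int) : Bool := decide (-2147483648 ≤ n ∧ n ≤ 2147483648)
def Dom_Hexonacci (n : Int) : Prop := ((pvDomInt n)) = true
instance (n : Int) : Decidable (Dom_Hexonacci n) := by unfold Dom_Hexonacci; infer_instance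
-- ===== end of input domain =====

-- B replaces A's O(n) shift loop by binary exponentiation of the 6x6 transition matrix (asymptotically faster).

-- ===== PORT A =====
-- A's while loop runs (n-1).toNat times (i counts 1,2,… while i < n), shifting six state variables.
def hexLoop : Nat → (Int × Int × Int × Int × Int × Int) → (Int × Int × Int × Int × Int × Int)
  | 0, s => s
  | k+1, (a, b, c, d, e, f) => hexLoop k (b, c, d, e, f, f + e + d + c + b + a)

def Hexonacci (n : Int) : Int :=
  (hexLoop (n - 1).toNat (0, 0, 0, 0, 0, 1)).2.2.2.2.2

-- ===== PORT B =====
abbrev HexV := Int × Int × Int × Int × Int × Int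
abbrev HexM := HexV × HexV × HexV × HexV × HexV × HexV

def hexDot (u v : HexV) : Int :=
  u.1 * v.1 + u.2.1 * v.2.1 + u.2.2.1 * v.2.2.1 + u.2.2.2.1 * v.2.2.2.1
    + u.2.2.2.2.1 * v.2.2.2.2.1 + u.2.2.2.2.2 * v.2.2.2.2.2

def hexScale (c : Int) (v : HexV) : HexV :=
  (c * v.1, c * v.2.1, c * v.2.2.1, c * v.2.2.2.1, c * v.2.2.2.2.1, c * v.2.2.2.2.2)

def hexAddV (u v : HexV) : HexV :=
  (u.1 + v.1, u.2.1 + v.2.1, u.2.2.1 + v.2.2.1, u.2.2.2.1 + v.2.2.2.1,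
    u.2.2.2.2.1 + v.2.2.2.2.1, u.2.2.2.2.2 + v.2.2.2.2.2)

-- row r times matrix y = linear combination of y's rows by r's entries (Source B's inner sum)
def hexRowMul (r : HexV) (y : HexM) : HexV :=
  hexAddV (hexScale r.1 y.1) (hexAddV (hexScale r.2.1 y.2.1)
    (hexAddV (hexScale r.2.2.1 y.2.2.1) (hexAddV (hexScale r.2.2.2.1 y.2.2.2.1)
      (hexAddV (hexScale r.2.2.2.2.1 y.2.2.2.2.1) (hexScale r.2.2.2.2.2 y.2.2.2.2.2)))))

def hexMul (x y : HexM) : HexM :=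
  (hexRowMul x.1 y, hexRowMul x.2.1 y, hexRowMul x.2.2.1 y, hexRowMul x.2.2.2.1 y,
    hexRowMul x.2.2.2.2.1 y, hexRowMul x.2.2.2.2.2 y)

def hexId : HexM :=
  ((1,0,0,0,0,0), (0,1,0,0,0,0), (0,0,1,0,0,0), (0,0,0,1,0,0), (0,0,0,0,1,0), (0,0,0,0,0,1))

def hexMatT : HexM :=
  ((0,1,0,0,0,0), (0,0,1,0,0,0), (0,0,0,1,0,0), (0,0,0,0,1,0), (0,0,0,0,0,1), (1,1,1,1,1,1))

def hexPow (m : HexM) (k : Nat) : HexM :=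
  if h : k = 0 then hexId
  else
    let p := hexPow m (k / 2)
    if k % 2 = 0 then hexMul p p else hexMul (hexMul p p) m
termination_by k
decreasing_by exact Nat.div_lt_self (Nat.pos_of_ne_zero h) (by norm_num)

def hexMulVec (m : HexM) (v : HexV) : HexV :=
  (hexDot m.1 v, hexDot m.2.1 v, hexDot m.2.2.1 v, hexDot m.2.2.2.1 v,
    hexDot m.2.2.2.2.1 v, hexDot m.2.2.2.2.2 v)

def Hexonacci_alt (n : Int) : Int :=
  (hexMulVec (hexPow hexMatT (n - 1).toNat) (0, 0, 0, 0, 0, 1)).2.2.2.2.2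

-- ===== PRECONDITION & SPEC =====
def Spec_Hexonacci (n : Int) (out : Int) : Prop := out = Hexonacci_alt n
instance (n : Int) (out : Int) : Decidable (Spec_Hexonacci n out) := by unfold Spec_Hexonacci; infer_instance

-- ===== CLAIM (what is proved, stated in full; the proofs are below) =====
def Claim_equal_Hexonacci : Prop := ∀ (n : Int), Dom_Hexonacci n → Spec_Hexonacci n (Hexonacci n)

-- ===== LEMMAS AND PROOFS =====

theorem hexMulVec_mul (x y : HexM) (v : HexV) :
    hexMulVec (hexMul x y) v = hexMulVec x (hexMulVec y v) := by
  simp only [hexMulVec, hexMul, hexRowMul, hexAddV, hexScale, hexDot, Prod.mk.injEq]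
  refine ⟨?_, ?_, ?_, ?_, ?_, ?_⟩ <;> ring

theorem hexMulVec_id (v : HexV) : hexMulVec hexId v = v := by
  obtain ⟨a, b, c, d, e, f⟩ := v
  simp only [hexMulVec, hexId, hexDot, Prod.mk.injEq]
  refine ⟨?_, ?_, ?_, ?_, ?_, ?_⟩ <;> ring

theorem hexMulVec_T (a b c d e f : Int) :
    hexMulVec hexMatT (a, b, c, d, e, f) = (b, c, d, e, f, f + e + d + c + b + a) := by
  simp only [hexMulVec, hexMatT, hexDot, Prod.mk.injEq]
  refine ⟨?_, ?_, ?_, ?_, ?_, ?_⟩ <;> ring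

theorem hexLoop_add (a b : Nat) (v : HexV) :
    hexLoop (a + b) v = hexLoop b (hexLoop a v) := by
  induction a generalizing v with
  | zero => simp [hexLoop]
  | succ a ih =>
      obtain ⟨x1, x2, x3, x4, x5, x6⟩ := v
      have : a + 1 + b = (a + b) + 1 := by omega
      rw [this]
      simp only [hexLoop]
      exact ih _

theorem hexPow_vec (k : Nat) (v : HexV) :
    hexMulVec (hexPow hexMatT k) v = hexLoop k v := by
  induction k using Nat.strong_induction_on generalizing v with
  | _ k ih =>
    rw [hexPow]
    by_cases h : k = 0
    · subst h; simp [hexMulVec_id, hexLoop]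
    · have hq : k / 2 < k := Nat.div_lt_self (Nat.pos_of_ne_zero h) (by norm_num)
      simp only [h, dite_false]
      by_cases he : k % 2 = 0
      · have hk : k / 2 + k / 2 = k := by omega
        simp only [he, if_true]
        rw [hexMulVec_mul, ih _ hq, ih _ hq, ← hexLoop_add, hk]
      · have hk : k = (k / 2 + k / 2) + 1 := by omega
        simp only [he, if_false]
        obtain ⟨a, b, c, d, e, f⟩ := v
        rw [hexMulVec_mul, hexMulVec_T, hexMulVec_mul, ih _ hq, ih _ hq, ← hexLoop_add]
        conv_rhs => rw [hk]
        simp only [hexLoop]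

-- ===== VERDICT (by name: the statement is the Claim_ definition above) =====
theorem Hexonacci_spec : Claim_equal_Hexonacci := by
  intro n _
  show Hexonacci n = Hexonacci_alt n
  unfold Hexonacci Hexonacci_alt
  rw [hexPow_vec]
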